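-- pv_equiv track=rewrite | github.com/anieri/fgv-macro-2025.1 | src/visualizer.py | _group_identical_states
-- ===== SOURCE A (Python) =====
-- def _group_identical_states(states_dict, keys_to_check):
--     groups = []
--     used = set()
--     keys = list(states_dict.keys())
--     for i, k1 in enumerate(keys):
--         if k1 in used: continue
--         group = [k1]
--         used.add(k1)
--         for k2 in keys[i+1:]:
--             if k2 in used: continue
--             is_identical = True
--             for field in keys_to_check:
--                 if states_dict[k1].get(field, 0) != states_dict[k2].get(field, 0):
--                     is_identical = False
--                     break
--             if is_identical:
--                 group.append(k2)
--                 used.add(k2)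
--         groups.append(group)
--     return groups
-- ===== SOURCE B (Python) =====
-- def _group_identical_states(states_dict, keys_to_check):
--     groups = {}
--     for key, state in states_dict.items():
--         sig = tuple(state.get(field, 0) for field in keys_to_check)
--         groups.setdefault(sig, []).append(key)
--     return list(groups.values())
-- ===== Notes on version B (the rewrite author's own statement) =====
-- stated objective: faster
-- what changed: Replaced the quadratic used-set pairwise scan by a single pass that buckets each key under its tuple of checked field values in an insertion-ordered dict and returns the bucket lists.
import Mathlib
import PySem

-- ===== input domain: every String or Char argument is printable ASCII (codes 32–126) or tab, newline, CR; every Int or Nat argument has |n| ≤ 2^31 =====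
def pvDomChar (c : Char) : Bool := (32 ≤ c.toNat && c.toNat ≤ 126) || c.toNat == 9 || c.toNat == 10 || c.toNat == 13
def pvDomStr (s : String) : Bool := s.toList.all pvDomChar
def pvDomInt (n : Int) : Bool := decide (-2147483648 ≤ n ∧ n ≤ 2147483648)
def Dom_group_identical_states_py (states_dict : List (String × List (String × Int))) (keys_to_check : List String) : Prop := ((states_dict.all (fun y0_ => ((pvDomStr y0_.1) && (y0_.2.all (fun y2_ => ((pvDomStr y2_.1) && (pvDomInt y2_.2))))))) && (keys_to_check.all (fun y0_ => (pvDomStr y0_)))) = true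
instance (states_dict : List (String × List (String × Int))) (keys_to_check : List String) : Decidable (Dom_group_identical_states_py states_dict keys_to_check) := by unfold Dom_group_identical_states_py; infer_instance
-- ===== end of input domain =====

-- B groups the keys in one pass by the tuple of checked field values (insertion-ordered dict of buckets)
-- instead of A's quadratic used-set pairwise scan; equivalence is proved on dict-shaped inputs (distinct keys).

-- ===== PORT A =====
-- A-side helpers: states_dict[k].get(field, 0); k is always a key of states_dict, so the [] default is never used
def pvFieldVal (states_dict : List (String × List (String × Int))) (k field : String) : Int :=
  PySem.Dict.getD (PySem.Dict.mk ((PySem.Dict.mk states_dict).getD k [])) field 0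

-- the body of A's inner 'for k2 in keys[i+1:]' loop (the is_identical for/break loop is the all-check)
def pvAInnerStep (states_dict : List (String × List (String × Int))) (keys_to_check : List String)
    (k1 : String) (acc2 : List String × PySem.Set String) (k2 : String) :
    List String × PySem.Set String :=
  if acc2.2.contains k2 then acc2
  else if keys_to_check.all (fun field => pvFieldVal states_dict k1 field == pvFieldVal states_dict k2 field)
  then (acc2.1 ++ [k2], acc2.2.add k2)
  else acc2

-- the body of A's outer 'for i, k1 in enumerate(keys)' loop
def pvAOuterStep (states_dict : List (String × List (String × Int))) (keys_to_check : List String)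
    (keys : List String) (acc : List (List String) × PySem.Set String) (ik : Int × String) :
    List (List String) × PySem.Set String :=
  if acc.2.contains ik.2 then acc
  else
    let inner := (PySem.List.slice keys (some (ik.1 + 1))).foldl
      (pvAInnerStep states_dict keys_to_check ik.2) ([ik.2], acc.2.add ik.2)
    (acc.1 ++ [inner.1], inner.2)

def group_identical_states_py (states_dict : List (String × List (String × Int))) (keys_to_check : List String) : List (List String) :=
  let keys := (PySem.Dict.mk states_dict).keys
  ((PySem.List.enumerate keys).foldl (pvAOuterStep states_dict keys_to_check keys)
    ([], PySem.Set.empty)).1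

-- ===== PORT B =====
-- B-side helper: the tuple of checked field values of one state (state.get(field, 0))
def pvSig (keys_to_check : List String) (state : List (String × Int)) : List Int :=
  keys_to_check.map (fun field => PySem.Dict.getD (PySem.Dict.mk state) field 0)

def group_identical_states_py_alt (states_dict : List (String × List (String × Int))) (keys_to_check : List String) : List (List String) :=
  (states_dict.foldl
    (fun (d : PySem.Dict (List Int) (List String)) p =>
      d.modify (pvSig keys_to_check p.2) [] (fun g => g ++ [p.1]))
    PySem.Dict.empty).values

-- ===== PRECONDITION & SPEC =====
-- Pre_ restricts to dict-shaped inputs: a Python dict has distinct keys by construction, so the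
-- association-list encoding with a duplicated top-level key corresponds to no input A ever receives.
def Pre_group_identical_states_py (states_dict : List (String × List (String × Int))) (keys_to_check : List String) : Prop :=
  (states_dict.map Prod.fst).Nodup
instance (states_dict : List (String × List (String × Int))) (keys_to_check : List String) : Decidable (Pre_group_identical_states_py states_dict keys_to_check) := by unfold Pre_group_identical_states_py; infer_instance

def pvWitness_group_identical_states_py : (List (String × List (String × Int))) × List String :=
  ([("a", [("x", 1)]), ("b", []), ("c", [("x", 1), ("y", 2)])], ["x"])

def Spec_group_identical_states_py (states_dict : List (String × List (String × Int))) (keys_to_check : List String) (out : List (List String)) : Prop := out = group_identical_states_py_alt states_dict keys_to_check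
instance (states_dict : List (String × List (String × Int))) (keys_to_check : List String) (out : List (List String)) : Decidable (Spec_group_identical_states_py states_dict keys_to_check out) := by unfold Spec_group_identical_states_py; infer_instance

-- ===== CLAIM (what is proved, stated in full; the proofs are below) =====
def Claim_equal_group_identical_states_py : Prop := ∀ (states_dict : List (String × List (String × Int))) (keys_to_check : List String), Dom_group_identical_states_py states_dict keys_to_check → Pre_group_identical_states_py states_dict keys_to_check → Spec_group_identical_states_py states_dict keys_to_check (group_identical_states_py states_dict keys_to_check)

-- ===== LEMMAS AND PROOFS =====

-- the signature of a key, as A computes it (lookups through states_dict)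
def pvSigA (states_dict : List (String × List (String × Int))) (keys_to_check : List String) (k : String) : List Int :=
  keys_to_check.map (fun field => pvFieldVal states_dict k field)

-- the common normal form both programs are reduced to
def pvGroups (ks : List String) (s : String → List Int) : List (List String) :=
  (PySem.Set.ofList (ks.map s)).map (fun c => ks.filter (fun k => s k == c))

-- 'for field in l: if f field != g field: break' as an all-check, as equality of the mapped lists
theorem pv_all_beq_map (l : List String) (f g : String → Int) :
    l.all (fun x => f x == g x) = (l.map f == l.map g) := by
  induction l with
  | nil => simp
  | cons x t ih => simp [List.all_cons, ih]

theorem pv_set_ofList_append_mem {x : List Int} {xs : List (List Int)} (h : x ∈ xs) :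
    PySem.Set.ofList (xs ++ [x]) = PySem.Set.ofList xs := by
  rw [PySem.Set.ofList_eq_foldl, List.foldl_append]
  simp [PySem.Set.add, ← PySem.Set.ofList_eq_foldl]
  exact h

theorem pv_set_ofList_append_not_mem {x : List Int} {xs : List (List Int)} (h : x ∉ xs) :
    PySem.Set.ofList (xs ++ [x]) = PySem.Set.ofList xs ++ [x] := by
  rw [PySem.Set.ofList_eq_foldl, List.foldl_append]
  simp [PySem.Set.add, ← PySem.Set.ofList_eq_foldl]
  exact h

-- the inner loop: appends the not-yet-used keys of l whose signature matches, and marks them used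
theorem pv_inner (sd : List (String × List (String × Int))) (ktc : List String) (k1 : String)
    (l : List String) (g : List String) (u : PySem.Set String) (hnd : l.Nodup) :
    (l.foldl (pvAInnerStep sd ktc k1) (g, u)).1
      = g ++ l.filter (fun k => !u.contains k && (pvSigA sd ktc k1 == pvSigA sd ktc k)) ∧
    (∀ k', k' ∈ (l.foldl (pvAInnerStep sd ktc k1) (g, u)).2 ↔
      k' ∈ u ∨ (k' ∈ l ∧ k' ∉ u ∧ pvSigA sd ktc k1 = pvSigA sd ktc k')) := by
  induction l generalizing g u with
  | nil => simp
  | cons x t ih =>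
    have hxt : x ∉ t := (List.nodup_cons.1 hnd).1
    have hndt : t.Nodup := (List.nodup_cons.1 hnd).2
    rw [List.foldl_cons]
    by_cases hc : u.contains x = true
    · have hxu : x ∈ u := (PySem.Set.contains_iff _ _).1 hc
      have hstep : pvAInnerStep sd ktc k1 (g, u) x = (g, u) := by
        simp [pvAInnerStep, hc, hxu]
      rw [hstep]
      obtain ⟨ih1, ih2⟩ := ih g u hndt
      refine ⟨?_, ?_⟩
      · rw [ih1, List.filter_cons]
        simp [hc, hxu]
      · intro k'
        rw [ih2 k']
        constructor
        · rintro (h | ⟨h1, h2, h3⟩)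
          · exact Or.inl h
          · exact Or.inr ⟨List.mem_cons_of_mem _ h1, h2, h3⟩
        · rintro (h | ⟨h1, h2, h3⟩)
          · exact Or.inl h
          · rcases List.mem_cons.1 h1 with rfl | h1'
            · exact absurd hxu h2
            · exact Or.inr ⟨h1', h2, h3⟩
    · have hc' : u.contains x = false := by simpa using hc
      have hxu : x ∉ u := fun h => hc ((PySem.Set.contains_iff _ _).2 h)
      have htest : (ktc.all (fun field => pvFieldVal sd k1 field == pvFieldVal sd x field))
          = (pvSigA sd ktc k1 == pvSigA sd ktc x) := pv_all_beq_map ktc _ _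
      by_cases hs : pvSigA sd ktc k1 = pvSigA sd ktc x
      · have hstep : pvAInnerStep sd ktc k1 (g, u) x = (g ++ [x], u.add x) := by
          simp [pvAInnerStep, hc', htest, hs, hxu]
        rw [hstep]
        obtain ⟨ih1, ih2⟩ := ih (g ++ [x]) (u.add x) hndt
        have hcong : ∀ k ∈ t,
            (!(u.add x).contains k && (pvSigA sd ktc k1 == pvSigA sd ktc k))
              = (!u.contains k && (pvSigA sd ktc k1 == pvSigA sd ktc k)) := by
          intro k hk
          have hkx : k ≠ x := fun h => hxt (h ▸ hk)
          have : (u.add x).contains k = u.contains k := by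
            rw [Bool.eq_iff_iff, PySem.Set.contains_iff, PySem.Set.contains_iff,
              PySem.Set.mem_add]
            simp [hkx]
          rw [this]
        refine ⟨?_, ?_⟩
        · rw [ih1, List.filter_congr hcong, List.filter_cons]
          simp [hc', hs, hxu]
        · intro k'
          rw [ih2 k']
          constructor
          · rintro (h | ⟨h1, h2, h3⟩)
            · rcases (PySem.Set.mem_add u x k').1 h with h' | heq
              · exact Or.inl h'
              · subst heq
                exact Or.inr ⟨List.mem_cons_self, hxu, hs⟩
            · refine Or.inr ⟨List.mem_cons_of_mem _ h1, fun hk'u => h2 ?_, h3⟩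
              exact (PySem.Set.mem_add u x k').2 (Or.inl hk'u)
          · rintro (h | ⟨h1, h2, h3⟩)
            · exact Or.inl ((PySem.Set.mem_add u x k').2 (Or.inl h))
            · rcases List.mem_cons.1 h1 with heq | h1'
              · subst heq
                exact Or.inl ((PySem.Set.mem_add u k' k').2 (Or.inr rfl))
              · have hkx : k' ≠ x := fun h => hxt (h ▸ h1')
                refine Or.inr ⟨h1', fun hk' => ?_, h3⟩
                rcases (PySem.Set.mem_add u x k').1 hk' with h' | heq
                · exact h2 h'
                · exact hkx heq
      · have hstep : pvAInnerStep sd ktc k1 (g, u) x = (g, u) := by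
          simp [pvAInnerStep, hc', htest, hs, hxu]
        rw [hstep]
        obtain ⟨ih1, ih2⟩ := ih g u hndt
        refine ⟨?_, ?_⟩
        · rw [ih1, List.filter_cons]
          simp [hs]
        · intro k'
          rw [ih2 k']
          constructor
          · rintro (h | ⟨h1, h2, h3⟩)
            · exact Or.inl h
            · exact Or.inr ⟨List.mem_cons_of_mem _ h1, h2, h3⟩
          · rintro (h | ⟨h1, h2, h3⟩)
            · exact Or.inl h
            · rcases List.mem_cons.1 h1 with rfl | h1'
              · exact absurd h3 hs
              · exact Or.inr ⟨h1', h2, h3⟩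

-- the outer loop, with the processed prefix generalized
theorem pv_outer (sd : List (String × List (String × Int))) (ktc : List String) :
    ∀ (suf pre : List String) (groups : List (List String)) (u : PySem.Set String),
    (pre ++ suf).Nodup →
    (∀ k, k ∈ u ↔ k ∈ pre ++ suf ∧ pvSigA sd ktc k ∈ pre.map (pvSigA sd ktc)) →
    groups = (PySem.Set.ofList (pre.map (pvSigA sd ktc))).map
      (fun c => (pre ++ suf).filter (fun k => pvSigA sd ktc k == c)) →
    ((PySem.List.enumerate suf (pre.length : Int)).foldl
        (pvAOuterStep sd ktc (pre ++ suf)) (groups, u)).1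
      = pvGroups (pre ++ suf) (pvSigA sd ktc) := by
  intro suf
  induction suf with
  | nil =>
    intro pre groups u hnd hu hg
    simp only [PySem.List.enumerate_nil, List.foldl_nil]
    rw [hg]
    unfold pvGroups
    simp
  | cons k1 rest ih =>
    intro pre groups u hnd hu hg
    have hks : pre ++ k1 :: rest = (pre ++ [k1]) ++ rest := by
      rw [List.append_assoc]; rfl
    have hk1ks : k1 ∈ pre ++ k1 :: rest := by simp
    have hk1rest : k1 ∉ rest := by
      have := List.Nodup.of_append_right hnd
      exact (List.nodup_cons.1 this).1
    have hndrest : rest.Nodup := by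
      have := List.Nodup.of_append_right hnd
      exact (List.nodup_cons.1 this).2
    have hlen : ((pre ++ [k1]).length : Int) = (pre.length : Int) + 1 := by
      simp
    rw [PySem.List.enumerate_cons, List.foldl_cons]
    by_cases hc : u.contains k1 = true
    · -- k1 already used: σ k1 occurred before; skip
      have hk1u : k1 ∈ u := (PySem.Set.contains_iff _ _).1 hc
      have hσmem : pvSigA sd ktc k1 ∈ pre.map (pvSigA sd ktc) :=
        ((hu k1).1 hk1u).2
      have hstep : pvAOuterStep sd ktc (pre ++ k1 :: rest) (groups, u) ((pre.length : Int), k1)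
          = (groups, u) := by
        simp [pvAOuterStep, hc, hk1u]
      rw [hstep]
      have := ih (pre ++ [k1]) groups u (by rw [← hks]; exact hnd) ?hu' ?hg'
      case hu' =>
        intro k
        rw [hu k]
        constructor
        · rintro ⟨h1, h2⟩
          exact ⟨by rw [← hks]; exact h1, by simp only [List.map_append]; exact List.mem_append_left _ h2⟩
        · rintro ⟨h1, h2⟩
          refine ⟨by rw [hks]; exact h1, ?_⟩
          simp only [List.map_append, List.mem_append] at h2
          rcases h2 with h2 | h2
          · exact h2
          · simp only [List.map_cons, List.map_nil, List.mem_singleton] at h2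
            rw [h2]; exact hσmem
      case hg' =>
        rw [hg]
        simp only [List.map_append, List.map_cons, List.map_nil]
        rw [pv_set_ofList_append_mem hσmem, ← hks]
      rw [← hks] at this
      rw [hlen] at this
      exact this
    · have hc' : u.contains k1 = false := by simpa using hc
      have hk1u : k1 ∉ u := fun hmem => hc ((PySem.Set.contains_iff _ _).2 hmem)
      have hσnot : pvSigA sd ktc k1 ∉ pre.map (pvSigA sd ktc) := by
        intro hmem
        exact hk1u ((hu k1).2 ⟨hk1ks, hmem⟩)
      have hslice : PySem.List.slice (pre ++ k1 :: rest) (some ((pre.length : Int) + 1)) = rest := by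
        rw [PySem.List.slice_from (pre ++ k1 :: rest) (a := (pre.length : Int) + 1) (by omega)]
        have ht : ((pre.length : Int) + 1).toNat = (pre ++ [k1]).length := by
          simp
        rw [ht, hks, List.drop_left]
      obtain ⟨hfst, hsnd⟩ := pv_inner sd ktc k1 rest [k1] (u.add k1) hndrest
      have hstep : pvAOuterStep sd ktc (pre ++ k1 :: rest) (groups, u) ((pre.length : Int), k1)
          = (groups ++ [(rest.foldl (pvAInnerStep sd ktc k1) ([k1], u.add k1)).1],
             (rest.foldl (pvAInnerStep sd ktc k1) ([k1], u.add k1)).2) := by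
        simp [pvAOuterStep, hc', hk1u, hslice]
      rw [hstep]
      -- the group collected for k1 is the filter of all keys by its signature
      have hfilter : rest.filter
            (fun k => !(u.add k1).contains k && (pvSigA sd ktc k1 == pvSigA sd ktc k))
          = rest.filter (fun k => pvSigA sd ktc k == pvSigA sd ktc k1) := by
        apply List.filter_congr
        intro k hk
        by_cases heq : pvSigA sd ktc k = pvSigA sd ktc k1
        · have hkk1 : k ≠ k1 := fun h => hk1rest (h ▸ hk)
          have hku : k ∉ u := by
            intro hmem
            exact hσnot (heq ▸ ((hu k).1 hmem).2)
          have hkadd : (u.add k1).contains k = false := by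
            rw [Bool.eq_false_iff]
            intro hcc
            rcases (PySem.Set.mem_add u k1 k).1 ((PySem.Set.contains_iff _ _).1 hcc) with h' | h'
            · exact hku h'
            · exact hkk1 h'
          simp [hkadd, heq]
          exact ⟨hku, hkk1⟩
        · have h1 : (pvSigA sd ktc k1 == pvSigA sd ktc k) = false := by
            simp; exact fun h => heq h.symm
          have h2 : (pvSigA sd ktc k == pvSigA sd ktc k1) = false := by
            simp; exact heq
          rw [h1, h2, Bool.and_false]
      have hprefilter : pre.filter (fun k => pvSigA sd ktc k == pvSigA sd ktc k1) = [] := by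
        rw [List.filter_eq_nil_iff]
        intro k hk hkc
        exact hσnot ((beq_iff_eq.1 hkc) ▸ List.mem_map_of_mem hk)
      have hgroup : (rest.foldl (pvAInnerStep sd ktc k1) ([k1], u.add k1)).1
          = (pre ++ k1 :: rest).filter (fun k => pvSigA sd ktc k == pvSigA sd ktc k1) := by
        rw [hfst, hfilter, List.filter_append, hprefilter, List.filter_cons]
        simp
      have := ih (pre ++ [k1]) (groups ++ [(rest.foldl (pvAInnerStep sd ktc k1) ([k1], u.add k1)).1])
        (rest.foldl (pvAInnerStep sd ktc k1) ([k1], u.add k1)).2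
        (by rw [← hks]; exact hnd) ?hu' ?hg'
      case hu' =>
        intro k
        rw [hsnd k]
        have hkin : k ∈ pre ++ [k1] ++ rest ↔ k ∈ pre ∨ k = k1 ∨ k ∈ rest := by
          simp
        have hσ' : pvSigA sd ktc k ∈ ((pre ++ [k1]).map (pvSigA sd ktc))
            ↔ pvSigA sd ktc k ∈ pre.map (pvSigA sd ktc) ∨ pvSigA sd ktc k = pvSigA sd ktc k1 := by
          simp
        rw [hkin, hσ']
        constructor
        · rintro (h | ⟨h1, h2, h3⟩)
          · rcases (PySem.Set.mem_add u k1 k).1 h with h' | heq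
            · obtain ⟨ha, hb⟩ := (hu k).1 h'
              refine ⟨?_, Or.inl hb⟩
              simpa using ha
            · subst heq
              exact ⟨Or.inr (Or.inl rfl), Or.inr rfl⟩
          · exact ⟨Or.inr (Or.inr h1), Or.inr h3.symm⟩
        · rintro ⟨h1, h2 | h2⟩
          · refine Or.inl ((PySem.Set.mem_add u k1 k).2 (Or.inl ?_))
            refine (hu k).2 ⟨?_, h2⟩
            rw [hks]; simpa using h1
          · rcases h1 with h1 | h1 | h1
            · exact absurd (h2 ▸ List.mem_map_of_mem h1) hσnot
            · exact Or.inl ((PySem.Set.mem_add u k1 k).2 (Or.inr h1))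
            · have hkk1 : k ≠ k1 := fun h => hk1rest (h ▸ h1)
              refine Or.inr ⟨h1, ?_, h2.symm⟩
              intro hmem
              rcases (PySem.Set.mem_add u k1 k).1 hmem with h' | h'
              · exact hσnot (h2 ▸ ((hu k).1 h').2)
              · exact hkk1 h'
      case hg' =>
        simp only [List.map_append, List.map_cons, List.map_nil]
        rw [pv_set_ofList_append_not_mem hσnot, List.map_append, hg, hgroup, ← hks]
        simp
      rw [← hks] at this
      rw [hlen] at this
      exact this

theorem pv_a_eq (sd : List (String × List (String × Int))) (ktc : List String)
    (h : (sd.map Prod.fst).Nodup) :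
    group_identical_states_py sd ktc = pvGroups (sd.map Prod.fst) (pvSigA sd ktc) := by
  have h0 := pv_outer sd ktc (sd.map Prod.fst) [] [] PySem.Set.empty
    (by simpa using h) (by intro k; simp [PySem.Set.empty]) (by simp)
  simp only [List.nil_append, List.length_nil, Nat.cast_zero] at h0
  unfold group_identical_states_py
  rw [PySem.Dict.keys_mk]
  exact h0

theorem pv_b_eq (sd : List (String × List (String × Int))) (ktc : List String)
    (h : (sd.map Prod.fst).Nodup) :
    group_identical_states_py_alt sd ktc = pvGroups (sd.map Prod.fst) (pvSigA sd ktc) := by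
  have hitems : (PySem.Dict.mk sd).items = sd := rfl
  have hknd : (PySem.Dict.mk sd).keys.Nodup := by
    rw [PySem.Dict.keys_mk]; exact h
  have hkeyf : ∀ p ∈ sd, pvSig ktc p.2 = pvSigA sd ktc p.1 := by
    intro p hp
    have hget : (PySem.Dict.mk sd).getD p.1 [] = p.2 :=
      PySem.Dict.getD_of_mem_items (PySem.Dict.mk sd) (by rw [hitems]; exact hp) hknd []
    simp [pvSig, pvSigA, pvFieldVal, hget]
  unfold group_identical_states_py_alt
  rw [PySem.Dict.values_eq_map_keys _ ?hnd []
    , PySem.Dict.keys_foldl_modify_key sd (fun p => pvSig ktc p.2) [] (fun _ p g => g ++ [p.1])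
        PySem.Dict.empty]
  case hnd =>
    exact PySem.Dict.nodup_keys_foldl_modify_key sd (fun p => pvSig ktc p.2) []
      (fun _ p g => g ++ [p.1]) PySem.Dict.empty (by simp)
  have hupd : PySem.Set.update (PySem.Dict.empty : PySem.Dict (List Int) (List String)).keys (sd.map (fun p => pvSig ktc p.2))
      = PySem.Set.ofList (sd.map (fun p => pvSig ktc p.2)) := by
    rw [PySem.Set.ofList_eq_foldl]; rfl
  rw [hupd]
  have hmapkey : sd.map (fun p => pvSig ktc p.2) = (sd.map Prod.fst).map (pvSigA sd ktc) := by
    rw [List.map_map]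
    exact List.map_congr_left hkeyf
  rw [hmapkey]
  unfold pvGroups
  apply List.map_congr_left
  intro c _
  have hfold : sd.foldl
      (fun (d : PySem.Dict (List Int) (List String)) p =>
        d.modify (pvSig ktc p.2) [] (fun g => g ++ [p.1])) PySem.Dict.empty
      = (sd.map (fun p => (pvSig ktc p.2, p.1))).foldl
          (fun d q => d.modify q.1 [] (fun g => g ++ [q.2])) PySem.Dict.empty := by
    rw [List.foldl_map]
  rw [hfold, PySem.Dict.getD_foldl_modify_append, PySem.Dict.getD_empty]
  rw [List.filter_map, List.map_map]
  simp only [List.nil_append, Function.comp_def]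
  have hfc : sd.filter (fun p => pvSig ktc p.2 == c) = sd.filter (fun p => pvSigA sd ktc p.1 == c) :=
    List.filter_congr (fun p hp => by rw [hkeyf p hp])
  rw [hfc, List.filter_map]
  simp [Function.comp_def]

-- ===== VERDICT (by name: the statement is the Claim_ definition above) =====
theorem group_identical_states_py_spec : Claim_equal_group_identical_states_py := by
  intro sd ktc _ hpre
  unfold Spec_group_identical_states_py
  rw [pv_a_eq sd ktc hpre, pv_b_eq sd ktc hpre]
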